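-- pv_equiv track=rewrite | github.com/Fabio-A-Sa/Y1S1-ProgramingFundamentals | PE/PE 06/3 - Binary numbers generator.py | binary_range
-- ===== SOURCE A (Python) =====
-- from math import pow
--
-- def decimal_to_binary (number):
--
--     string = ""
--     while (number):
--         aux = number % 2
--         number = (number - aux) // 2
--         string = str(aux) + string
--
--     return int(string)
--
-- def binary_to_decimal (number):
--
--     total = 0
--     power = 0
--     while (number):
--
--         last_digit = number % 10
--         total = total + last_digit * pow(2, power)
--         power += 1
--         number = number // 10
--
--     return int(total)
--
-- def binary_range(start, end):
--
--     solution = [start]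
--     min_number = binary_to_decimal(start) + 1
--     max_number = binary_to_decimal(end)
--
--     for number in range (min_number, max_number):
--         solution.append(decimal_to_binary(number))
--
--     for number in solution:
--         yield number
-- ===== SOURCE B (Python) =====
-- def _val(x):
--     # value of a binary-as-decimal int (recursive Horner from the low digit)
--     return 0 if x == 0 else _val(x // 10) * 2 + x % 10
--
-- def _to_bin(n):
--     # binary-as-decimal representation of n
--     return 0 if n == 0 else _to_bin(n // 2) * 10 + n % 2
--
-- def _inc(cur):
--     # add 1 in binary, staying in the binary-as-decimal representation
--     return cur + 1 if cur % 10 == 0 else _inc(cur // 10) * 10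
--
-- def binary_range(start, end):
--     yield start
--     n = _val(start) + 1
--     hi = _val(end)
--     if n < hi:
--         cur = _to_bin(n)
--         yield cur
--         for _ in range(hi - n - 1):
--             cur = _inc(cur)
--             yield cur
-- ===== Notes on version B (the rewrite author's own statement) =====
-- stated objective: alternative
-- what changed: B is a direct generator that converts the two bounds once (recursive Horner), emits the first binary via one value-to-binary conversion, and then produces each further number by a binary increment with carry on the previous binary representation, instead of A's build-a-list with a fresh decimal-to-binary conversion (string building + int reparse) for every number in the range.
import Mathlib
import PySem

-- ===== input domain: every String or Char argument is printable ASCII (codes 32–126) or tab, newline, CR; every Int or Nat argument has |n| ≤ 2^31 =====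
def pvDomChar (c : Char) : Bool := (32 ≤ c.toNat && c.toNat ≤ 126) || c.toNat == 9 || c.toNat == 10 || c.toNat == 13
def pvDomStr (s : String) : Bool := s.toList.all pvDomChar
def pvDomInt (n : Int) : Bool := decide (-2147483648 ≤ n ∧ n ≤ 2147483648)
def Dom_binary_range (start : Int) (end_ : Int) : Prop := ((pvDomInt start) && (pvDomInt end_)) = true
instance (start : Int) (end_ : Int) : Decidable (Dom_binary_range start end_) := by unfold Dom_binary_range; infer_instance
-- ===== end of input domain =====

-- B replaces A's per-number decimal→binary conversion (string building + int reparse) by one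
-- conversion of the first element and a binary increment-with-carry for every further element.
-- Equivalence of the RETURN VALUE (the generator, materialised as a list), on Pre_ (both arguments ≥ 0;
-- Python A loops forever on a negative argument).

-- ===== PORT A =====
-- while (number): aux = number % 2; number = (number - aux) // 2; string = str(aux) + string
-- The Python loop builds the decimal string of binary digits and the function returns int(string).
-- The port tracks that string's numeric reading directly: `acc` = int(string) and `mult` = 10^len(string)
-- (exact: int(str(aux) + s) = aux * 10^len(s) + int(s) for a digit string s). For number = 0 Python's
-- int("") raises ValueError — unreachable from binary_range under Pre_ (it is only called with number ≥ 1);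
-- for number < 0 Python loops forever (also unreachable under Pre_); the port recurses on number.toNat.
def pvDtbLoop (n : Nat) (acc mult : Nat) : Nat :=
  if n = 0 then acc else pvDtbLoop (n / 2) ((n % 2) * mult + acc) (mult * 10)

def decimal_to_binary (number : Int) : Int := (pvDtbLoop number.toNat 0 1 : Int)

-- while (number): last_digit = number % 10; total += last_digit * pow(2, power); power += 1; number //= 10
-- pow(2, power) is a float in Python; on Dom every intermediate total is < 2^53, so integer 2^power is exact.
-- For number < 0 Python loops forever (excluded by Pre_); the port recurses on number.toNat.
def pvBtdLoop (n : Nat) (power : Nat) (total : Nat) : Nat :=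
  if n = 0 then total else pvBtdLoop (n / 10) (power + 1) (total + (n % 10) * 2 ^ power)

def binary_to_decimal (number : Int) : Int := (pvBtdLoop number.toNat 0 0 : Int)

def binary_range (start : Int) (end_ : Int) : List Int :=
  let solution : List Int := [start]
  let min_number := binary_to_decimal start + 1
  let max_number := binary_to_decimal end_
  let solution := (PySem.List.pyRange min_number max_number 1).foldl
    (fun acc number => acc ++ [decimal_to_binary number]) solution
  solution

-- ===== PORT B =====
-- _val(x) = 0 if x == 0 else _val(x // 10) * 2 + x % 10    (Python recursion on x // 10; x ≥ 0 under Pre_)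
def pvVal (x : Nat) : Nat := if x = 0 then 0 else pvVal (x / 10) * 2 + x % 10

-- _to_bin(n) = 0 if n == 0 else _to_bin(n // 2) * 10 + n % 2
def pvToBin (n : Nat) : Nat := if n = 0 then 0 else pvToBin (n / 2) * 10 + n % 2

-- _inc(cur) = cur + 1 if cur % 10 == 0 else _inc(cur // 10) * 10
def pvInc (cur : Nat) : Nat := if cur % 10 = 0 then cur + 1 else pvInc (cur / 10) * 10

def binary_range_alt (start : Int) (end_ : Int) : List Int :=
  let n : Int := (pvVal start.toNat : Int) + 1
  let hi : Int := (pvVal end_.toNat : Int)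
  if n < hi then
    let cur := pvToBin n.toNat
    let res := (PySem.List.pyRange 0 (hi - n - 1) 1).foldl
      (fun (p : List Int × Nat) _ => let c := pvInc p.2; (p.1 ++ [(c : Int)], c))
      ([start, (cur : Int)], cur)
    res.1
  else [start]

-- ===== PRECONDITION & SPEC =====
-- Pre_: both arguments nonnegative — on a negative argument Python A never returns
-- (binary_to_decimal's `number // 10` loop never reaches 0).
def Pre_binary_range (start : Int) (end_ : Int) : Prop := 0 ≤ start ∧ 0 ≤ end_
instance (start : Int) (end_ : Int) : Decidable (Pre_binary_range start end_) := by
  unfold Pre_binary_range; infer_instance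

def pvWitness_binary_range : Int × Int := (10, 110)

def Spec_binary_range (start : Int) (end_ : Int) (out : List Int) : Prop := out = binary_range_alt start end_
instance (start : Int) (end_ : Int) (out : List Int) : Decidable (Spec_binary_range start end_ out) := by unfold Spec_binary_range; infer_instance

-- ===== CLAIM (what is proved, stated in full; the proofs are below) =====
def Claim_equal_binary_range : Prop := ∀ (start : Int) (end_ : Int), Dom_binary_range start end_ → Pre_binary_range start end_ → Spec_binary_range start end_ (binary_range start end_)

-- ===== LEMMAS AND PROOFS =====

-- A's binary_to_decimal loop computes B's recursive Horner value.
theorem pvBtdLoop_eq (n : Nat) : ∀ (p t : Nat), pvBtdLoop n p t = t + 2 ^ p * pvVal n := by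
  induction n using Nat.strong_induction_on with
  | _ n ih =>
    intro p t
    rw [pvBtdLoop, pvVal]
    by_cases h : n = 0
    · simp [h]
    · have hlt : n / 10 < n := Nat.div_lt_self (Nat.pos_of_ne_zero h) (by norm_num)
      rw [if_neg h, if_neg h, ih _ hlt]
      ring

-- A's decimal_to_binary loop computes B's _to_bin (tracking the place multiplier).
theorem pvDtbLoop_eq (n : Nat) : ∀ (acc mult : Nat), pvDtbLoop n acc mult = pvToBin n * mult + acc := by
  induction n using Nat.strong_induction_on with
  | _ n ih =>
    intro acc mult
    rw [pvDtbLoop, pvToBin]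
    by_cases h : n = 0
    · simp [h]
    · have hlt : n / 2 < n := Nat.div_lt_self (Nat.pos_of_ne_zero h) (by norm_num)
      rw [if_neg h, if_neg h, ih _ hlt]
      ring

-- the binary increment advances the binary representation: _inc(_to_bin n) = _to_bin (n+1)
theorem pvInc_toBin (n : Nat) : pvInc (pvToBin n) = pvToBin (n + 1) := by
  induction n using Nat.strong_induction_on with
  | _ n ih =>
    by_cases h0 : n = 0
    · subst h0; simp [pvToBin, pvInc]
    · have hne : ¬(n + 1 = 0) := by omega
      rcases Nat.even_or_odd n with he | ho
      · -- n even: last binary digit 0, _inc just adds 1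
        have h2 : n % 2 = 0 := Nat.even_iff.mp he
        have hsucc : (n + 1) % 2 = 1 ∧ (n + 1) / 2 = n / 2 := by omega
        conv_lhs => rw [pvToBin, if_neg h0, h2]
        rw [pvInc, if_pos (by omega : (pvToBin (n / 2) * 10 + 0) % 10 = 0)]
        conv_rhs => rw [pvToBin, if_neg hne, hsucc.1, hsucc.2]
      · -- n odd: last binary digit 1, carry into _inc(cur // 10)
        have h2 : n % 2 = 1 := Nat.odd_iff.mp ho
        have hsucc : (n + 1) % 2 = 0 ∧ (n + 1) / 2 = n / 2 + 1 := by omega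
        conv_lhs => rw [pvToBin, if_neg h0, h2]
        rw [pvInc, if_neg (by omega : ¬(pvToBin (n / 2) * 10 + 1) % 10 = 0),
            (by omega : (pvToBin (n / 2) * 10 + 1) / 10 = pvToBin (n / 2)),
            ih _ (Nat.div_lt_self (Nat.pos_of_ne_zero h0) (by norm_num))]
        conv_rhs => rw [pvToBin, if_neg hne, hsucc.1, hsucc.2]
        omega

-- B's increment fold, unrolled: starting from _to_bin m it emits _to_bin (m+1), …, _to_bin (m+k).
theorem pvChain (k : Nat) (acc : List Int) (m : Nat) :
    (List.range k).foldl
      (fun (p : List Int × Nat) _ => (p.1 ++ [((pvInc p.2 : Nat) : Int)], pvInc p.2))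
      (acc, pvToBin m)
    = (acc ++ (List.range k).map (fun i => ((pvToBin (m + 1 + i) : Nat) : Int)), pvToBin (m + k)) := by
  induction k generalizing acc m with
  | zero => simp
  | succ k ih =>
    rw [List.range_succ, List.foldl_append, ih]
    simp [pvInc_toBin, Nat.add_assoc, Nat.add_comm, Nat.add_left_comm]

-- ===== VERDICT (by name: the statement is the Claim_ definition above) =====
theorem binary_range_spec : Claim_equal_binary_range := by
  intro start end_ _hdom hpre
  obtain ⟨hs, he⟩ := hpre
  show binary_range start end_ = binary_range_alt start end_
  unfold binary_range binary_range_alt binary_to_decimal decimal_to_binary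
  rw [pvBtdLoop_eq, pvBtdLoop_eq]
  simp only [zero_add, pow_zero, one_mul]
  set a := pvVal start.toNat with ha
  set e := pvVal end_.toNat with hee
  rw [PySem.List.foldl_append_singleton_eq_map, PySem.List.pyRange_one, PySem.List.pyRange_one]
  by_cases h : ((a : Int) + 1) < (e : Int)
  · rw [if_pos h]
    have hae : a + 1 < e := by exact_mod_cast h
    have htn : (((a : Int)) + 1).toNat = a + 1 := by omega
    have hK : (((e : Int)) - ((a : Int) + 1)).toNat = (e - (a + 1) - 1) + 1 := by omega
    have hk : (((e : Int)) - ((a : Int) + 1) - 1 - 0).toNat = e - (a + 1) - 1 := by omega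
    rw [htn, hK, hk, List.foldl_map, pvChain (e - (a + 1) - 1) _ (a + 1)]
    rw [List.range_succ_eq_map]
    simp only [List.map_cons, List.map_map]
    simp only [Function.comp_def]
    have hmapeq :
        List.map (fun k : Nat => ((pvDtbLoop ((a : Int) + 1 + ((Nat.succ k : Nat) : Int)).toNat 0 1 : Nat) : Int))
            (List.range (e - (a + 1) - 1))
          = List.map (fun i => ((pvToBin (a + 1 + 1 + i) : Nat) : Int)) (List.range (e - (a + 1) - 1)) :=
      List.map_congr_left (fun k _ => by
        simp only [pvDtbLoop_eq, Nat.mul_one, Nat.add_zero, Nat.cast_inj]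
        congr 1
        omega)
    have hfirst : ((a : Int) + 1 + ((0 : Nat) : Int)).toNat = a + 1 := by push_cast; omega
    rw [hmapeq, hfirst, pvDtbLoop_eq]
    simp
  · rw [if_neg h]
    have : (((e : Int)) - ((a : Int) + 1)).toNat = 0 := by omega
    rw [this]
    simp
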